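-- pv_equiv track=rewrite | github.com/nmrs/sotd_pipeline | analysis/blade_extraction_baseline.py | extract_body_snippet
-- ===== SOURCE A (Python) =====
-- def extract_body_snippet(body: str, target_text: str) -> str:
--     """Extract a snippet of the body text around the target text."""
--     if not body or not target_text:
--         return ""
--
--     # Find the line containing the target text
--     lines = body.split("\n")
--     for line in lines:
--         if target_text in line:
--             return line.strip()
--
--     return ""
-- ===== SOURCE B (Python) =====
-- def extract_body_snippet(body: str, target_text: str) -> str:
--     """Extract a snippet of the body text around the target text."""
--     if not body or not target_text:
--         return ""
--     if "\n" in target_text: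
--         # a target spanning a line break can never lie within a single line
--         return ""
--
--     idx = body.find(target_text)
--     if idx == -1:
--         return ""
--
--     start = body.rfind("\n", 0, idx) + 1
--     end = body.find("\n", idx)
--     if end == -1:
--         end = len(body)
--     return body[start:end].strip()
-- ===== Notes on version B (the rewrite author's own statement) =====
-- stated objective: alternative
-- what changed: A splits the whole body into a list of lines and scans them for the first line containing the target; B runs one substring search (str.find) and recovers the enclosing line's boundaries with rfind/find index arithmetic plus a slice, never materialising the line list (targets containing a newline are rejected up front, since no single line can contain them).
import Mathlib
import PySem

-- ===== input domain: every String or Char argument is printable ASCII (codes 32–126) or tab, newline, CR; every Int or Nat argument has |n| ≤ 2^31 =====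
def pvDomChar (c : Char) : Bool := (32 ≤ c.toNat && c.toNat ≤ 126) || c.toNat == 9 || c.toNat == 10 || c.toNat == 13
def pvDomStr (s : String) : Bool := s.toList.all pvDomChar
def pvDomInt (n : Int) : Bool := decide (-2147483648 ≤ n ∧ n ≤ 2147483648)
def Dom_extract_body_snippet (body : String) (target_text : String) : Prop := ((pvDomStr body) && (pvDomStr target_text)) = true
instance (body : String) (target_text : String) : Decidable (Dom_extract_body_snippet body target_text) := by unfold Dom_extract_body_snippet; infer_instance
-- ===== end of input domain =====

-- B replaces A's split-the-whole-body-then-scan-lines loop by a single substring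
-- search plus index-based recovery of the enclosing line's boundaries (find/rfind/slice);
-- targets containing a newline are rejected up front (no single line can contain them).

-- ===== PORT A =====
-- helper: the 'for line in lines: if target_text in line: return line.strip()' loop
def pvGoA (t : String) : List String → String
  | [] => ""
  | l :: ls => if PySem.Str.isIn t l then PySem.Str.strip l else pvGoA t ls

def extract_body_snippet (body : String) (target_text : String) : String :=
  if body = "" ∨ target_text = "" then ""
  else
    match PySem.Str.split? body "\n" with
    | none => ""   -- unreachable: the separator "\n" is nonempty, split? never returns none
    | some lines => pvGoA target_text lines

-- ===== PORT B =====
def extract_body_snippet_alt (body : String) (target_text : String) : String :=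
  if body = "" ∨ target_text = "" then ""
  else if PySem.Str.isIn "\n" target_text then ""
  else
    let idx := PySem.Str.find body target_text
    if idx = -1 then ""
    else
      let start := PySem.Str.rfindFrom body "\n" 0 (some idx) + 1
      let e := PySem.Str.findFrom body "\n" idx none
      let e2 := if e = -1 then PySem.Str.len body else e
      PySem.Str.strip (PySem.Str.slice body (some start) (some e2))

-- ===== PRECONDITION & SPEC =====
def Spec_extract_body_snippet (body : String) (target_text : String) (out : String) : Prop := out = extract_body_snippet_alt body target_text
instance (body : String) (target_text : String) (out : String) : Decidable (Spec_extract_body_snippet body target_text out) := by unfold Spec_extract_body_snippet; infer_instance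

-- ===== CLAIM (what is proved, stated in full; the proofs are below) =====
def Claim_equal_extract_body_snippet : Prop := ∀ (body : String) (target_text : String), Dom_extract_body_snippet body target_text → Spec_extract_body_snippet body target_text (extract_body_snippet body target_text)

-- ===== LEMMAS AND PROOFS =====

def pvLines : List Char → List (List Char)
  | [] => [[]]
  | c :: r => if c = '\n' then [] :: pvLines r
              else match pvLines r with
                | [] => [[c]]
                | h :: t => (c :: h) :: t

def pvCons (pre : List Char) : List (List Char) → List (List Char)
  | [] => [pre]
  | h :: t => (pre ++ h) :: t

lemma pvLines_ne_nil (cs : List Char) : pvLines cs ≠ [] := by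
  cases cs with
  | nil => simp [pvLines]
  | cons c r =>
    simp only [pvLines]
    split
    · simp
    · split <;> simp

lemma go_inv : ∀ (fuel : Nat) (l cur : List Char) (acc : List (List Char)), l.length ≤ fuel →
    PySem.Chars.splitOn.go ['\n'] fuel l cur acc = acc.reverse ++ pvCons cur.reverse (pvLines l) := by
  intro fuel
  induction fuel with
  | zero =>
    intro l cur acc h
    have : l = [] := List.eq_nil_of_length_eq_zero (Nat.le_zero.mp h)
    subst this
    simp [PySem.Chars.splitOn.go, pvLines, pvCons]
  | succ n ih =>
    intro l cur acc h
    cases l with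
    | nil => simp [PySem.Chars.splitOn.go, pvLines, pvCons]
    | cons c rest =>
      rw [PySem.Chars.splitOn.go]
      by_cases hc : c = '\n'
      · subst hc
        have hp : List.isPrefixOf ['\n'] ('\n' :: rest) = true := by
          simp
        simp only [hp, if_pos]
        rw [ih _ _ _ (by simpa using Nat.le_of_succ_le_succ h)]
        obtain ⟨hL, tL, hEq⟩ := List.exists_cons_of_ne_nil (pvLines_ne_nil rest)
        simp [pvLines, pvCons, hEq]
      · have hp : List.isPrefixOf ['\n'] (c :: rest) = false := by
          simp [List.isPrefixOf, Ne.symm hc]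
        simp only [hp, Bool.false_eq_true, if_false]
        rw [ih _ _ _ (by simpa using Nat.le_of_succ_le_succ h)]
        obtain ⟨hL, tL, hEq⟩ := List.exists_cons_of_ne_nil (pvLines_ne_nil rest)
        simp [pvLines, pvCons, hEq, hc]

lemma splitOn_eq_pvLines (cs : List Char) : PySem.Chars.splitOn cs ['\n'] = pvLines cs := by
  rw [PySem.Chars.splitOn, go_inv (cs.length + 1) cs [] [] (Nat.le_succ _)]
  obtain ⟨hL, tL, hEq⟩ := List.exists_cons_of_ne_nil (pvLines_ne_nil cs)
  simp [pvCons, hEq]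

lemma nl_pfx (s : List Char) (k : Nat) : ['\n'] <+: s.drop k ↔ s[k]? = some '\n' := by
  rw [← List.head?_drop]
  cases h : s.drop k with
  | nil => simp
  | cons a r => simp [List.prefix_cons_iff, eq_comm]

lemma rfind_go_cases (s : List Char) (j : Nat) :
    (PySem.Chars.rfind.go s ['\n'] j = -1 ∧ ∀ k ≤ j, s[k]? ≠ some '\n')
    ∨ (∃ m : Nat, m ≤ j ∧ PySem.Chars.rfind.go s ['\n'] j = m ∧ s[m]? = some '\n' ∧
        ∀ k, m < k → k ≤ j → s[k]? ≠ some '\n') := by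
  induction j with
  | zero =>
    rw [PySem.Chars.rfind.go]
    by_cases h : List.isPrefixOf ['\n'] s
    · right
      refine ⟨0, le_refl _, by simp [h], ?_, by omega⟩
      have := (List.isPrefixOf_iff_prefix).mp h
      simpa using (nl_pfx s 0).mp (by simpa using this)
    · left
      constructor
      · simp [h]
      · intro k hk
        interval_cases k
        intro hc
        exact h (List.isPrefixOf_iff_prefix.mpr ((nl_pfx s 0).mpr (by simpa using hc)))
  | succ j ih =>
    rw [PySem.Chars.rfind.go]
    by_cases h : List.isPrefixOf ['\n'] (s.drop (j + 1))
    · right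
      refine ⟨j + 1, le_refl _, by simp [h], (nl_pfx s (j+1)).mp (List.isPrefixOf_iff_prefix.mp h), by omega⟩
    · have hnot : s[j+1]? ≠ some '\n' := fun hc =>
        h (List.isPrefixOf_iff_prefix.mpr ((nl_pfx s (j+1)).mpr hc))
      rcases ih with ⟨h1, h2⟩ | ⟨m, hm, h1, h2, h3⟩
      · left
        refine ⟨by simp [h, h1], fun k hk => ?_⟩
        rcases Nat.lt_or_ge k (j+1) with hk' | hk'
        · exact h2 k (by omega)
        · have : k = j + 1 := by omega
          subst this; exact hnot
      · right
        refine ⟨m, by omega, by simp [h, h1], h2, fun k hk1 hk2 => ?_⟩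
        rcases Nat.lt_or_ge k (j+1) with hk' | hk'
        · exact h3 k hk1 (by omega)
        · have : k = j + 1 := by omega
          subst this; exact hnot

lemma rfind_cases (s : List Char) :
    (PySem.Chars.rfind s ['\n'] = -1 ∧ '\n' ∉ s)
    ∨ (∃ m : Nat, PySem.Chars.rfind s ['\n'] = m ∧ s[m]? = some '\n' ∧
        ∀ k : Nat, m < k → s[k]? ≠ some '\n') := by
  rw [PySem.Chars.rfind]
  rcases rfind_go_cases s s.length with ⟨h1, h2⟩ | ⟨m, hm, h1, h2, h3⟩
  · left
    refine ⟨h1, fun hmem => ?_⟩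
    obtain ⟨k, hk, hkel⟩ := List.getElem_of_mem hmem
    exact h2 k (by omega) (by simp [List.getElem?_eq_some_iff]; exact ⟨hk, hkel⟩)
  · right
    refine ⟨m, h1, h2, fun k hk => ?_⟩
    rcases Nat.lt_or_ge s.length k with hk' | hk'
    · simp [List.getElem?_eq_none_iff.mpr (by omega : s.length ≤ k)]
    · exact h3 k hk (by omega)

lemma rfind_eq_of (s : List Char) (m : Nat) (h1 : s[m]? = some '\n')
    (h2 : ∀ k : Nat, m < k → s[k]? ≠ some '\n') : PySem.Chars.rfind s ['\n'] = (m : Int) := by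
  rcases rfind_cases s with ⟨_, hno⟩ | ⟨m', e1, e2, e3⟩
  · exact absurd (List.mem_of_getElem? h1) hno
  · rcases Nat.lt_trichotomy m m' with h | h | h
    · exact absurd e2 (h2 m' h)
    · subst h; exact e1
    · exact absurd h1 (e3 m h)

lemma rfind_neg (s : List Char) (h : '\n' ∉ s) : PySem.Chars.rfind s ['\n'] = -1 := by
  rcases rfind_cases s with ⟨h1, _⟩ | ⟨m, _, e2, _⟩
  · exact h1
  · exact absurd (List.mem_of_getElem? e2) h

lemma find_eq_of (s t : List Char) (m : Nat) (ht : t ≠ []) (h1 : t <+: s.drop m)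
    (h2 : ∀ k : Nat, k < m → ¬ t <+: s.drop k) : PySem.Chars.find s t = (m : Int) := by
  have hinf : PySem.Chars.isIn t s = true :=
    (PySem.Chars.exists_prefix_drop_iff_isIn t s).mp ⟨m, h1⟩
  have hnn : 0 ≤ PySem.Chars.find s t := by
    rw [PySem.Chars.find_nonneg_iff]
    exact (PySem.Chars.isIn_iff_infix t s).mp hinf
  obtain ⟨hs1, hs2⟩ := PySem.Chars.find_spec hnn
  rcases Nat.lt_trichotomy (PySem.Chars.find s t).toNat m with h | h | h
  · exact absurd hs1 (h2 _ h)
  · omega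
  · exact absurd h1 (hs2 m h)

lemma find_neg (s t : List Char) (h : ∀ k : Nat, ¬ t <+: s.drop k) : PySem.Chars.find s t = -1 := by
  rw [PySem.Chars.find_eq_neg_one_iff]
  intro hinf
  obtain ⟨k, hk⟩ := (PySem.Chars.exists_prefix_drop_iff_isIn t s).mpr
    ((PySem.Chars.isIn_iff_infix t s).mpr hinf)
  exact h k hk

lemma find_nl_eq_of (s : List Char) (m : Nat) (h1 : s[m]? = some '\n')
    (h2 : ∀ k : Nat, k < m → s[k]? ≠ some '\n') : PySem.Chars.find s ['\n'] = (m : Int) := by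
  refine find_eq_of s ['\n'] m (by simp) ((nl_pfx s m).mpr h1) (fun k hk hc => h2 k hk ((nl_pfx s k).mp hc))

lemma find_nl_neg (s : List Char) (h : '\n' ∉ s) : PySem.Chars.find s ['\n'] = -1 := by
  refine find_neg s ['\n'] (fun k hc => h (List.mem_of_getElem? ((nl_pfx s k).mp hc)))

lemma app_nl_getElem (L R : List Char) : (L ++ '\n' :: R)[L.length]? = some '\n' := by
  rw [List.getElem?_append_right (le_refl _)]
  simp

lemma occ_cases (L R t : List Char) (k : Nat) (ht : t ≠ []) (hnl : '\n' ∉ t)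
    (h : t <+: (L ++ '\n' :: R).drop k) :
    (k + t.length ≤ L.length ∧ t <+: L.drop k) ∨
    (L.length + 1 ≤ k ∧ t <+: R.drop (k - L.length - 1)) := by
  rcases Nat.lt_or_ge L.length k with hk | hk
  · right
    refine ⟨by omega, ?_⟩
    have : (L ++ '\n' :: R).drop k = R.drop (k - L.length - 1) := by
      have h1 : k = L.length + (k - L.length) := by omega
      rw [h1, List.drop_length_add_append]
      have h2 : k - L.length = (k - L.length - 1) + 1 := by omega
      rw [h2]
      simp
    rwa [this] at h
  · rcases Nat.lt_or_ge L.length (k + t.length) with hk2 | hk2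
    · -- the occurrence would contain the '\n' at position L.length: contradiction
      exfalso
      obtain ⟨u, hu⟩ := h
      have hidx : t[L.length - k]? = some '\n' := by
        have h1 : (L ++ '\n' :: R).drop k = t ++ u := hu.symm
        have h2 : ((L ++ '\n' :: R).drop k)[L.length - k]? = some '\n' := by
          rw [List.getElem?_drop]
          have : k + (L.length - k) = L.length := by omega
          rw [this, app_nl_getElem]
        rw [h1, List.getElem?_append_left (by omega)] at h2
        exact h2
      exact hnl (List.mem_of_getElem? hidx)
    · left
      refine ⟨hk2, ?_⟩
      rw [List.prefix_iff_eq_take]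
      rw [List.prefix_iff_eq_take] at h
      rw [List.drop_append_of_le_length hk, List.take_append_of_le_length (by simp; omega)] at h
      exact h

lemma occ_down (L R t : List Char) (m : Nat) (h : t <+: R.drop m) :
    t <+: (L ++ '\n' :: R).drop (L.length + 1 + m) := by
  have h1 : L.length + 1 + m = L.length + (1 + m) := by omega
  rw [h1, List.drop_length_add_append]
  have h2 : (('\n' :: R).drop (1 + m)) = R.drop m := by
    have : 1 + m = m + 1 := by omega
    rw [this]
    simp
  rwa [h2]

lemma find_shift (L R t : List Char) (ht : t ≠ []) (hnl : '\n' ∉ t) (hL : ¬ t <:+: L) :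
    PySem.Chars.find (L ++ '\n' :: R) t =
      if PySem.Chars.find R t = -1 then -1 else (L.length + 1 : Int) + PySem.Chars.find R t := by
  by_cases hR : PySem.Chars.find R t = -1
  · rw [if_pos hR]
    refine find_neg _ t (fun k hk => ?_)
    rcases occ_cases L R t k ht hnl hk with ⟨_, hp⟩ | ⟨_, hp⟩
    · exact hL (List.IsInfix.trans hp.isInfix (List.drop_suffix _ _).isInfix)
    · rw [PySem.Chars.find_eq_neg_one_iff] at hR
      exact hR (List.IsInfix.trans hp.isInfix (List.drop_suffix _ _).isInfix)
  · rw [if_neg hR]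
    have hnn : 0 ≤ PySem.Chars.find R t := by
      rcases Int.lt_or_le (PySem.Chars.find R t) 0 with h | h
      · exfalso
        have := PySem.Chars.neg_one_le_find R t
        omega
      · exact h
    obtain ⟨hs1, hs2⟩ := PySem.Chars.find_spec hnn
    set m := (PySem.Chars.find R t).toNat with hm
    have : PySem.Chars.find (L ++ '\n' :: R) t = ((L.length + 1 + m : Nat) : Int) := by
      refine find_eq_of _ t _ ht ?_ (fun k hk hp => ?_)
      · exact occ_down L R t m hs1
      · rcases occ_cases L R t k ht hnl hp with ⟨_, hq⟩ | ⟨hge, hq⟩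
        · exact hL (List.IsInfix.trans hq.isInfix (List.drop_suffix _ _).isInfix)
        · exact hs2 (k - L.length - 1) (by omega) hq
    rw [this]
    push_cast
    omega

lemma find_in_first (L R t : List Char) (ht : t ≠ []) (hnl : '\n' ∉ t)
    (hin : PySem.Chars.isIn t L = true) :
    ∃ i : Nat, PySem.Chars.find (L ++ '\n' :: R) t = (i : Int) ∧ i + t.length ≤ L.length := by
  obtain ⟨j, hj⟩ := (PySem.Chars.exists_prefix_drop_iff_isIn t L).mpr hin
  have hjlen : t.length ≤ L.length - j := by
    have := hj.length_le
    simpa using this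
  have hjL : j ≤ L.length := by
    by_contra hc
    rw [List.drop_eq_nil_of_le (by omega)] at hj
    exact ht (List.prefix_nil.mp hj)
  have hocc : t <+: (L ++ '\n' :: R).drop j := by
    rw [List.drop_append_of_le_length hjL]
    exact List.prefix_append_of_prefix hj
  have hnn : 0 ≤ PySem.Chars.find (L ++ '\n' :: R) t := by
    rw [PySem.Chars.find_nonneg_iff]
    exact List.IsInfix.trans hj.isInfix (List.drop_suffix _ _).isInfix |>.trans
      (List.prefix_append _ ('\n' :: R)).isInfix
  obtain ⟨hs1, hs2⟩ := PySem.Chars.find_spec hnn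
  set i := (PySem.Chars.find (L ++ '\n' :: R) t).toNat with hi
  have hile : i ≤ j := by
    by_contra hc
    exact hs2 j (by omega) hocc
  rcases occ_cases L R t i ht hnl hs1 with ⟨hle, _⟩ | ⟨hge, _⟩
  · exact ⟨i, by omega, hle⟩
  · omega

lemma rfindFrom_zero_eval (s : List Char) (i : Nat) (hi : i ≤ s.length) :
    PySem.Chars.rfindFrom s ['\n'] 0 (some (i : Int)) =
      if PySem.Chars.rfind (s.take i) ['\n'] = -1 then -1
      else PySem.Chars.rfind (s.take i) ['\n'] := by
  rw [PySem.Chars.rfindFrom]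
  have h1 : ¬ ((s.length : Int) < (i : Int)) := by exact_mod_cast not_lt.mpr hi
  have h2 : ¬ ((i : Int) < 0) := by omega
  simp only [if_neg h1, if_neg h2, if_neg (by omega : ¬ ((i:Int) < (0:Int)))]
  have h4 : (i : Int).toNat = i := Int.toNat_natCast i
  simp [h4]

def pvFirst (t : List Char) : List (List Char) → List Char
  | [] => []
  | l :: ls => if PySem.Chars.isIn t l then PySem.Chars.strip l else pvFirst t ls

def BChars (cs t : List Char) : List Char :=
  let idx := PySem.Chars.find cs t
  if idx = -1 then []
  else
    let start := PySem.Chars.rfindFrom cs ['\n'] 0 (some idx) + 1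
    let e := PySem.Chars.findFrom cs ['\n'] idx none
    let e2 := if e = -1 then (cs.length : Int) else e
    PySem.Chars.strip (PySem.Chars.slice cs (some start) (some e2))

lemma pvLines_no_nl (cs : List Char) (h : '\n' ∉ cs) : pvLines cs = [cs] := by
  induction cs with
  | nil => rfl
  | cons c r ih =>
    have hc : c ≠ '\n' := fun hc => h (hc ▸ List.mem_cons_self)
    have hr : '\n' ∉ r := fun hr => h (List.mem_cons_of_mem _ hr)
    simp [pvLines, hc, ih hr]

lemma pvLines_append (L R : List Char) (h : '\n' ∉ L) :
    pvLines (L ++ '\n' :: R) = L :: pvLines R := by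
  induction L with
  | nil => simp [pvLines]
  | cons c r ih =>
    have hc : c ≠ '\n' := fun hc => h (hc ▸ List.mem_cons_self)
    have hr : '\n' ∉ r := fun hr => h (List.mem_cons_of_mem _ hr)
    simp [List.cons_append, pvLines, hc, ih hr]

lemma find_toNat (cs t : List Char) (h : PySem.Chars.isIn t cs = true) :
    ∃ i : Nat, PySem.Chars.find cs t = (i : Int) ∧ i ≤ cs.length := by
  have hnn : 0 ≤ PySem.Chars.find cs t := by
    rw [PySem.Chars.find_nonneg_iff]
    exact (PySem.Chars.isIn_iff_infix t cs).mp h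
  have hle := PySem.Chars.find_le_length cs t
  exact ⟨(PySem.Chars.find cs t).toNat, by omega, by omega⟩

lemma case_no_nl (cs t : List Char) (ht : t ≠ []) (hcs : '\n' ∉ cs) :
    pvFirst t (pvLines cs) = BChars cs t := by
  rw [pvLines_no_nl cs hcs]
  by_cases hin : PySem.Chars.isIn t cs = true
  · obtain ⟨i, hfi, hile⟩ := find_toNat cs t hin
    simp only [pvFirst, hin, if_pos]
    rw [BChars, hfi]
    rw [if_neg (by omega : ¬ ((i:Int) = -1))]
    rw [rfindFrom_zero_eval cs i hile]
    rw [rfind_neg _ (fun hmem => hcs (List.mem_of_mem_take hmem))]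
    rw [if_pos rfl]
    rw [PySem.Chars.findFrom_natCast cs ['\n'] i hile]
    rw [find_nl_neg _ (fun hmem => hcs (List.mem_of_mem_drop hmem))]
    have hslice : PySem.Chars.slice cs (some 0) (some ((cs.length : Int))) = cs := by
      rw [PySem.Chars.slice_eq_listSlice, PySem.List.slice_toNat _ le_rfl (by positivity)]
      simp
    simp [hslice]
  · have hf : PySem.Chars.isIn t cs = false := by simpa using hin
    simp only [pvFirst, hf, Bool.false_eq_true, if_false]
    rw [BChars]
    rw [(PySem.Chars.find_eq_neg_one_iff cs t).mpr
      (fun hinf => hin ((PySem.Chars.isIn_iff_infix t cs).mpr hinf))]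
    simp

lemma case_first (L R t : List Char) (ht : t ≠ []) (hnl : '\n' ∉ t) (hL : '\n' ∉ L)
    (hin : PySem.Chars.isIn t L = true) :
    pvFirst t (pvLines (L ++ '\n' :: R)) = BChars (L ++ '\n' :: R) t := by
  rw [pvLines_append L R hL]
  simp only [pvFirst, hin, if_pos]
  obtain ⟨i, hfi, hib⟩ := find_in_first L R t ht hnl hin
  have htpos : 0 < t.length := List.length_pos_iff.mpr ht
  have hiL : i < L.length := by omega
  have hile : i ≤ (L ++ '\n' :: R).length := by simp; omega
  rw [BChars, hfi, if_neg (by omega : ¬ ((i:Int) = -1))]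
  rw [rfindFrom_zero_eval _ i hile]
  rw [List.take_append_of_le_length (by omega : i ≤ L.length)]
  rw [rfind_neg _ (fun hmem => hL (List.mem_of_mem_take hmem))]
  rw [PySem.Chars.findFrom_natCast _ ['\n'] i hile]
  have hdrop : (L ++ '\n' :: R).drop i = L.drop i ++ '\n' :: R :=
    List.drop_append_of_le_length (by omega)
  have hfind : PySem.Chars.find ((L ++ '\n' :: R).drop i) ['\n'] = ((L.length - i : Nat) : Int) := by
    rw [hdrop]
    refine find_nl_eq_of _ (L.length - i) ?_ (fun k hk => ?_)
    · rw [show L.length - i = (L.drop i).length by simp,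
        List.getElem?_append_right (le_refl _)]
      simp
    · rw [List.getElem?_append_left (by simp; omega)]
      intro hc
      exact hL (List.mem_of_mem_drop (List.mem_of_getElem? hc))
  rw [hfind]
  have h1 : ¬ (((L.length - i : Nat) : Int) = -1) := by omega
  have h2 : (i : Int) + ((L.length - i : Nat) : Int) = (L.length : Int) := by omega
  have hslice : PySem.Chars.slice (L ++ '\n' :: R) (some 0) (some ((L.length : Int))) = L := by
    rw [PySem.Chars.slice_eq_listSlice, PySem.List.slice_toNat _ le_rfl (by positivity)]
    simp [List.take_left]
  simp only [if_pos rfl, h1, if_false, Bool.false_eq_true, h2]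
  have h3 : ¬ ((L.length : Int) = -1) := by omega
  simp [h3, hslice]

lemma rfind_append_nl (L v : List Char) :
    PySem.Chars.rfind (L ++ '\n' :: v) ['\n'] =
      if PySem.Chars.rfind v ['\n'] = -1 then (L.length : Int)
      else (L.length : Int) + 1 + PySem.Chars.rfind v ['\n'] := by
  rcases rfind_cases v with ⟨hv1, hv2⟩ | ⟨m, hv1, hv2, hv3⟩
  · rw [if_pos hv1]
    refine rfind_eq_of _ L.length (app_nl_getElem L v) (fun k hk hc => ?_)
    rw [List.getElem?_append_right (by omega : L.length ≤ k)] at hc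
    have hk1 : k - L.length = (k - L.length - 1) + 1 := by omega
    rw [hk1, List.getElem?_cons_succ] at hc
    exact hv2 (List.mem_of_getElem? hc)
  · have hne : PySem.Chars.rfind v ['\n'] ≠ -1 := by rw [hv1]; omega
    rw [if_neg hne, hv1]
    have : (L.length : Int) + 1 + (m : Int) = ((L.length + 1 + m : Nat) : Int) := by push_cast; ring
    rw [this]
    refine rfind_eq_of _ (L.length + 1 + m) ?_ (fun k hk hc => ?_)
    · rw [List.getElem?_append_right (by omega : L.length ≤ L.length + 1 + m)]
      have : L.length + 1 + m - L.length = m + 1 := by omega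
      rw [this, List.getElem?_cons_succ]
      exact hv2
    · rw [List.getElem?_append_right (by omega : L.length ≤ k)] at hc
      have hk1 : k - L.length = (k - L.length - 1) + 1 := by omega
      rw [hk1, List.getElem?_cons_succ] at hc
      exact hv3 (k - L.length - 1) (by omega) hc

lemma case_shift (L R t : List Char) (ht : t ≠ []) (hnl : '\n' ∉ t)
    (hnin : PySem.Chars.isIn t L = false) :
    BChars (L ++ '\n' :: R) t = BChars R t := by
  have hLinf : ¬ t <:+: L := (PySem.Chars.isIn_eq_false_iff t L).mp hnin
  rw [BChars, BChars, find_shift L R t ht hnl hLinf]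
  by_cases hR : PySem.Chars.find R t = -1
  · simp [hR]
  · rw [if_neg hR, if_neg hR]
    have hnn : 0 ≤ PySem.Chars.find R t := by
      have := PySem.Chars.neg_one_le_find R t
      rcases Int.lt_or_le (PySem.Chars.find R t) 0 with h | h
      · exfalso; omega
      · exact h
    have hlen := PySem.Chars.find_le_length R t
    set i' : Nat := (PySem.Chars.find R t).toNat with hi'def
    have hfi : PySem.Chars.find R t = (i' : Int) := by omega
    have hi'le : i' ≤ R.length := by omega
    rw [hfi]
    have hcast : (L.length : Int) + 1 + (i' : Int) = ((L.length + 1 + i' : Nat) : Int) := by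
      push_cast; ring
    rw [hcast]
    have hne1 : ¬ (((L.length + 1 + i' : Nat) : Int) = -1) := by omega
    have hne2 : ¬ ((i' : Int) = -1) := by omega
    rw [if_neg hne1]
    have hilecs : L.length + 1 + i' ≤ (L ++ '\n' :: R).length := by simp; omega
    rw [rfindFrom_zero_eval _ (L.length + 1 + i') hilecs, rfindFrom_zero_eval _ i' hi'le]
    have htake : (L ++ '\n' :: R).take (L.length + 1 + i') = L ++ '\n' :: R.take i' := by
      have h1 : L.length + 1 + i' = L.length + (1 + i') := by omega
      rw [h1, List.take_length_add_append]
      have h2 : 1 + i' = i' + 1 := by omega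
      rw [h2]
      simp
    rw [htake, rfind_append_nl L (R.take i')]
    -- start relation
    have hstart : ∃ a : Nat,
        ((if PySem.Chars.rfind (R.take i') ['\n'] = -1 then (-1 : Int)
          else PySem.Chars.rfind (R.take i') ['\n']) + 1 = (a : Int)) ∧
        ((if (if PySem.Chars.rfind (R.take i') ['\n'] = -1 then (L.length : Int)
              else (L.length : Int) + 1 + PySem.Chars.rfind (R.take i') ['\n']) = -1 then (-1 : Int)
          else (if PySem.Chars.rfind (R.take i') ['\n'] = -1 then (L.length : Int)
              else (L.length : Int) + 1 + PySem.Chars.rfind (R.take i') ['\n'])) + 1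
          = ((L.length + 1 + a : Nat) : Int)) := by
      rcases rfind_cases (R.take i') with ⟨hv1, _⟩ | ⟨m, hv1, _, _⟩
      · refine ⟨0, ?_, ?_⟩ <;> simp [hv1] <;> omega
      · have hne : PySem.Chars.rfind (R.take i') ['\n'] ≠ -1 := by rw [hv1]; omega
        refine ⟨m + 1, ?_, ?_⟩ <;> rw [hv1] <;> simp [hne] <;> push_cast <;> omega
    obtain ⟨a, ha1, ha2⟩ := hstart
    rw [ha1, ha2]
    -- end relation
    rw [PySem.Chars.findFrom_natCast _ ['\n'] (L.length + 1 + i') hilecs,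
        PySem.Chars.findFrom_natCast _ ['\n'] i' hi'le]
    have hdropcs : (L ++ '\n' :: R).drop (L.length + 1 + i') = R.drop i' := by
      have h1 : L.length + 1 + i' = L.length + (1 + i') := by omega
      rw [h1, List.drop_length_add_append]
      have h2 : 1 + i' = i' + 1 := by omega
      rw [h2]
      simp
    rw [hdropcs]
    simp only []
    have hend : ∃ b : Nat,
        ((if (if PySem.Chars.find (R.drop i') ['\n'] = -1 then (-1 : Int)
             else (i' : Int) + PySem.Chars.find (R.drop i') ['\n']) = -1 then (R.length : Int)
          else (if PySem.Chars.find (R.drop i') ['\n'] = -1 then (-1 : Int)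
             else (i' : Int) + PySem.Chars.find (R.drop i') ['\n'])) = (b : Int)) ∧
        ((if (if PySem.Chars.find (R.drop i') ['\n'] = -1 then (-1 : Int)
             else ((L.length + 1 + i' : Nat) : Int) + PySem.Chars.find (R.drop i') ['\n']) = -1
            then ((L ++ '\n' :: R).length : Int)
          else (if PySem.Chars.find (R.drop i') ['\n'] = -1 then (-1 : Int)
             else ((L.length + 1 + i' : Nat) : Int) + PySem.Chars.find (R.drop i') ['\n']))
          = ((L.length + 1 + b : Nat) : Int)) := by
      by_cases hf : PySem.Chars.find (R.drop i') ['\n'] = -1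
      · refine ⟨R.length, ?_, ?_⟩ <;> simp [hf] <;> push_cast <;> omega
      · have hfnn : 0 ≤ PySem.Chars.find (R.drop i') ['\n'] := by
          have := PySem.Chars.neg_one_le_find (R.drop i') ['\n']
          omega
        refine ⟨i' + (PySem.Chars.find (R.drop i') ['\n']).toNat, ?_, ?_⟩ <;>
          simp [hf] <;> push_cast <;> omega
    obtain ⟨b, hb1, hb2⟩ := hend
    rw [hb1, hb2]
    -- slice relation
    have hsl : PySem.Chars.slice (L ++ '\n' :: R) (some ((L.length + 1 + a : Nat) : Int))
        (some ((L.length + 1 + b : Nat) : Int)) = PySem.Chars.slice R (some (a : Int)) (some (b : Int)) := by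
      rw [PySem.Chars.slice_eq_listSlice, PySem.Chars.slice_eq_listSlice,
          PySem.List.slice_natCast, PySem.List.slice_natCast]
      have hda : (L ++ '\n' :: R).drop (L.length + 1 + a) = R.drop a := by
        have h1 : L.length + 1 + a = L.length + (1 + a) := by omega
        rw [h1, List.drop_length_add_append]
        have h2 : 1 + a = a + 1 := by omega
        rw [h2]
        simp
      rw [hda]
      congr 1
      omega
    rw [hsl]

lemma split_at_nl (cs : List Char) (h : '\n' ∈ cs) :
    ∃ L R, cs = L ++ '\n' :: R ∧ '\n' ∉ L := by
  induction cs with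
  | nil => simp at h
  | cons c r ih =>
    by_cases hc : c = '\n'
    · exact ⟨[], r, by simp [hc], by simp⟩
    · have hr : '\n' ∈ r := by
        rcases List.mem_cons.mp h with h1 | h1
        · exact absurd h1.symm hc
        · exact h1
      obtain ⟨L, R, hEq, hL⟩ := ih hr
      exact ⟨c :: L, R, by simp [hEq], by simp [hL, Ne.symm hc]⟩

lemma pvMain : ∀ (n : Nat) (cs t : List Char), t ≠ [] → '\n' ∉ t → cs.length ≤ n →
    pvFirst t (pvLines cs) = BChars cs t := by
  intro n
  induction n with
  | zero =>
    intro cs t ht hnl hlen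
    have : cs = [] := List.eq_nil_of_length_eq_zero (Nat.le_zero.mp hlen)
    subst this
    exact case_no_nl [] t ht (by simp)
  | succ n ih =>
    intro cs t ht hnl hlen
    by_cases hmem : '\n' ∈ cs
    · obtain ⟨L, R, rfl, hL⟩ := split_at_nl cs hmem
      by_cases hin : PySem.Chars.isIn t L = true
      · exact case_first L R t ht hnl hL hin
      · have hf : PySem.Chars.isIn t L = false := by simpa using hin
        rw [pvLines_append L R hL]
        simp only [pvFirst, hf, Bool.false_eq_true, if_false]
        rw [case_shift L R t ht hnl hf]
        exact ih R t ht hnl (by simp at hlen; omega)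
    · exact case_no_nl cs t ht hmem

lemma strip_ofList (l : List Char) :
    PySem.Str.strip (String.ofList l) = String.ofList (PySem.Chars.strip l) := by
  apply String.toList_inj.mp
  rw [PySem.Str.toList_strip, String.toList_ofList, String.toList_ofList]

lemma goA_bridge (t : String) (Ls : List (List Char)) :
    pvGoA t (Ls.map String.ofList) = String.ofList (pvFirst t.toList Ls) := by
  induction Ls with
  | nil => rfl
  | cons l ls ih =>
    simp only [List.map_cons, pvGoA, pvFirst, PySem.Str.isIn_eq, String.toList_ofList]
    by_cases h : PySem.Chars.isIn t.toList l = true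
    · rw [if_pos h, if_pos h, strip_ofList]
    · rw [if_neg h, if_neg h, ih]

lemma portA_bridge (body target_text : String) (hg : ¬ (body = "" ∨ target_text = "")) :
    extract_body_snippet body target_text =
      String.ofList (pvFirst target_text.toList (pvLines body.toList)) := by
  rw [extract_body_snippet, if_neg hg]
  have h1 : PySem.Str.split? body "\n" =
      some ((PySem.Chars.splitOn body.toList ['\n']).map String.ofList) := by
    rw [PySem.Str.split?]
    have : ("\n" : String).toList = ['\n'] := rfl
    rw [this, PySem.Chars.split?]
    simp
  rw [h1]
  show pvGoA target_text ((PySem.Chars.splitOn body.toList ['\n']).map String.ofList) = _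
  rw [goA_bridge, splitOn_eq_pvLines]

lemma portB_bridge (body target_text : String) (hg : ¬ (body = "" ∨ target_text = ""))
    (hnl : PySem.Str.isIn "\n" target_text = false) :
    (extract_body_snippet_alt body target_text).toList = BChars body.toList target_text.toList := by
  rw [extract_body_snippet_alt, if_neg hg, hnl]
  simp only [Bool.false_eq_true, if_false, BChars, PySem.Str.find_eq, PySem.Str.rfindFrom_eq,
    PySem.Str.findFrom_eq, PySem.Str.len_eq]
  by_cases h : PySem.Chars.find body.toList target_text.toList = -1
  · simp [h]
  · simp only [h, if_false]
    rw [PySem.Str.toList_strip, PySem.Str.toList_slice]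
    rfl

lemma pvLines_nl_free : ∀ (cs : List Char), ∀ l ∈ pvLines cs, '\n' ∉ l := by
  intro cs
  induction cs with
  | nil => simp [pvLines]
  | cons c r ih =>
    by_cases hc : c = '\n'
    · subst hc
      simp only [pvLines, if_pos rfl]
      intro l hl
      rcases List.mem_cons.mp hl with h1 | h1
      · simp [h1]
      · exact ih l h1
    · simp only [pvLines, hc, if_false]
      obtain ⟨hd, tl, hEq⟩ := List.exists_cons_of_ne_nil (pvLines_ne_nil r)
      rw [hEq]
      intro l hl
      rcases List.mem_cons.mp hl with h1 | h1
      · subst h1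
        intro hmem
        rcases List.mem_cons.mp hmem with h2 | h2
        · exact hc h2.symm
        · exact ih hd (hEq ▸ List.mem_cons_self) h2
      · exact ih l (hEq ▸ List.mem_cons_of_mem _ h1)

lemma pvFirst_nil_of_nl (cs t : List Char) (h : '\n' ∈ t) :
    pvFirst t (pvLines cs) = [] := by
  have hall : ∀ ls : List (List Char), (∀ l ∈ ls, '\n' ∉ l) → pvFirst t ls = [] := by
    intro ls
    induction ls with
    | nil => intro _; rfl
    | cons l ls ihl =>
      intro hls
      have h1 : PySem.Chars.isIn t l = false :=
        (PySem.Chars.isIn_eq_false_iff t l).mpr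
          (fun hinf => hls l List.mem_cons_self (hinf.mem h))
      simp only [pvFirst, h1, Bool.false_eq_true, if_false]
      exact ihl (fun x hx => hls x (List.mem_cons_of_mem _ hx))
  exact hall (pvLines cs) (pvLines_nl_free cs)

lemma final_check (body target_text : String) :
    extract_body_snippet body target_text = extract_body_snippet_alt body target_text := by
  by_cases hg : body = "" ∨ target_text = ""
  · rw [extract_body_snippet, if_pos hg, extract_body_snippet_alt, if_pos hg]
  · by_cases hnl : '\n' ∈ target_text.toList
    · -- target spans a line break: A's scan finds no line containing it; B's guard fires
      have hA : extract_body_snippet body target_text = "" := by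
        rw [portA_bridge body target_text hg, pvFirst_nil_of_nl _ _ hnl]
      have hguard : PySem.Str.isIn "\n" target_text = true := by
        rw [PySem.Str.isIn_eq]
        exact (PySem.Chars.isIn_iff_infix _ _).mpr
          (by
            obtain ⟨s1, s2, hEq⟩ := List.append_of_mem hnl
            exact ⟨s1, s2, by simpa using hEq.symm⟩)
      have hB : extract_body_snippet_alt body target_text = "" := by
        rw [extract_body_snippet_alt, if_neg hg, hguard]
        simp
      rw [hA, hB]
    · have hguard : PySem.Str.isIn "\n" target_text = false := by
        rw [PySem.Str.isIn_eq]
        refine (PySem.Chars.isIn_eq_false_iff _ _).mpr (fun hinf => hnl ?_)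
        exact hinf.mem (by simp)
      apply String.toList_inj.mp
      rw [portB_bridge body target_text hg hguard, portA_bridge body target_text hg,
        String.toList_ofList]
      refine pvMain body.toList.length body.toList target_text.toList ?_ hnl le_rfl
      intro hc
      exact hg (Or.inr (String.toList_eq_nil_iff.mp hc))

-- ===== VERDICT (by name: the statement is the Claim_ definition above) =====
theorem extract_body_snippet_spec : Claim_equal_extract_body_snippet := by
  intro body target_text _hdom
  unfold Spec_extract_body_snippet
  exact final_check body target_text
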